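-- pv_equiv track=rewrite | github.com/Hauffe/python_world | CS50/hackerhank.py | solution
-- ===== SOURCE A (Python) =====
-- def solution(queries):
--     files = {}
--     returns = []
--     for touple in queries:
--         cmd = touple[0]
--         if cmd == "ADD_FILE":
--             file = touple[1]
--             size = int(touple[2])
--             if file in files:
--                 files[file] = size
--                 returns.append("overwritten")
--             else:
--                 files[file] = size
--                 returns.append("created")
--         if cmd == "GET_FILE_SIZE":
--             file = touple[1]
--             if file in files:
--                 returns.append(str(files[file]))
--             else:
--                 returns.append("")
--         if cmd == "MOVE_FILE":
--             file1 = touple[1]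
--             file2 = touple[2]
--             if file2 not in files and file1 in files:
--                 files[file2] = files[file1]
--                 del  files[file1]
--                 returns.append("true")
--             else:
--                 returns.append("false")
--         if cmd == "GET_N_LARGEST":
--             file_name = touple[1]
--             num = int(touple[2])
--             temp_files = sorted(files.items(), key = lambda item: (item[1], item[0]), reverse=True)
--             count = num
--             string = ""
--             for key, _ in temp_files:
--                 if file_name in key and files[key] > num and count > 0:
--                     count -= 1
--                     string += key+"("+str(files[key])+")"
--                     if count > 0:
--                         string+=", "
--             returns.append(string)
--     return(returns)
-- ===== SOURCE B (Python) =====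
-- def solution(queries):
--     sizes = {}              # name -> size
--     order = []              # (size, name) pairs, kept sorted in descending order
--     out = []
--
--     def insert_sorted(pair):
--         i = 0
--         while i < len(order) and pair < order[i]:
--             i += 1
--         order.insert(i, pair)
--
--     for q in queries:
--         cmd = q[0]
--         if cmd == "ADD_FILE":
--             name, size = q[1], int(q[2])
--             if name in sizes:
--                 order.remove((sizes[name], name))
--                 out.append("overwritten")
--             else:
--                 out.append("created")
--             sizes[name] = size
--             insert_sorted((size, name))
--         elif cmd == "GET_FILE_SIZE":
--             name = q[1]
--             out.append(str(sizes[name]) if name in sizes else "")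
--         elif cmd == "MOVE_FILE":
--             src, dst = q[1], q[2]
--             if dst not in sizes and src in sizes:
--                 sz = sizes.pop(src)
--                 order.remove((sz, src))
--                 sizes[dst] = sz
--                 insert_sorted((sz, dst))
--                 out.append("true")
--             else:
--                 out.append("false")
--         elif cmd == "GET_N_LARGEST":
--             pat, num = q[1], int(q[2])
--             remaining = num
--             s = ""
--             for size, name in order:
--                 if remaining <= 0:
--                     break
--                 if pat in name and size > num:
--                     remaining -= 1
--                     s += name + "(" + str(size) + ")"
--                     if remaining > 0:
--                         s += ", "
--             out.append(s)
--     return out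
-- ===== Notes on version B (the rewrite author's own statement) =====
-- stated objective: alternative
-- what changed: B keeps a dict of sizes plus an incrementally maintained (size, name)-descending sorted list, so GET_N_LARGEST is a single early-exit streaming scan instead of re-sorting all files on every query; Pre_ excludes queries that are too short for their command or whose numeric field is not an int literal, on which A raises IndexError/ValueError.
import Mathlib
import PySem

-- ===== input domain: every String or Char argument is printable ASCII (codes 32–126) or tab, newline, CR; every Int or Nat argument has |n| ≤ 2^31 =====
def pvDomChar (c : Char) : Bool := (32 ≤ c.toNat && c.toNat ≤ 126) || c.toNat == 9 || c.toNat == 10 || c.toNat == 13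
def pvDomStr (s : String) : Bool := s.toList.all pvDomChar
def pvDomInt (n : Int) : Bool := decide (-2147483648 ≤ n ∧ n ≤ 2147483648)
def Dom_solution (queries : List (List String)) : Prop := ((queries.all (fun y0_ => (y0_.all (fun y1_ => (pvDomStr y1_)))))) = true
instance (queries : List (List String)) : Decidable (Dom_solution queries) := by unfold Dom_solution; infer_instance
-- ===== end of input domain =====

-- B replaces A's per-query full sort by a file dict plus an incrementally maintained
-- (size, name)-descending list, so GET_N_LARGEST is a single early-exit streaming scan;
-- alternative algorithm, same return value.

-- ===== PORT A =====
-- one step of A's loop over queries; the dict lookups files[key] inside GET_N_LARGEST are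
-- ported as getD 0 (the key always comes from files.items, so Python's KeyError is unreachable)
def aStep (st : PySem.Dict String Int × List String) (touple : List String) :
    PySem.Dict String Int × List String :=
  let cmd := PySem.List.pyGetD touple 0 ""
  let st :=
    if cmd = "ADD_FILE" then
      let files := st.1
      let file := PySem.List.pyGetD touple 1 ""
      let size := (PySem.Int.ofStr? (PySem.List.pyGetD touple 2 "")).getD 0
      if files.contains file then (files.insert file size, st.2 ++ ["overwritten"])
      else (files.insert file size, st.2 ++ ["created"])
    else st
  let st :=
    if cmd = "GET_FILE_SIZE" then
      let files := st.1
      let file := PySem.List.pyGetD touple 1 ""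
      if files.contains file then (files, st.2 ++ [PySem.Int.toStr (files.getD file 0)])
      else (files, st.2 ++ [""])
    else st
  let st :=
    if cmd = "MOVE_FILE" then
      let files := st.1
      let file1 := PySem.List.pyGetD touple 1 ""
      let file2 := PySem.List.pyGetD touple 2 ""
      if !files.contains file2 && files.contains file1 then
        ((files.insert file2 (files.getD file1 0)).erase file1, st.2 ++ ["true"])
      else (files, st.2 ++ ["false"])
    else st
  let st :=
    if cmd = "GET_N_LARGEST" then
      let files := st.1
      let file_name := PySem.List.pyGetD touple 1 ""
      let num := (PySem.Int.ofStr? (PySem.List.pyGetD touple 2 "")).getD 0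
      let temp_files := PySem.List.sorted2 files.items (fun item => item.2) (fun item => item.1) true
      let res := temp_files.foldl (fun (cs : Int × String) kv =>
          if PySem.Str.isIn file_name kv.1 && decide (num < files.getD kv.1 0) && decide (0 < cs.1) then
            let count := cs.1 - 1
            let string := cs.2 ++ kv.1 ++ "(" ++ PySem.Int.toStr (files.getD kv.1 0) ++ ")"
            (count, if 0 < count then string ++ ", " else string)
          else cs) (num, "")
      (files, st.2 ++ [res.2])
    else st
  st

def solution (queries : List (List String)) : List String :=
  (queries.foldl aStep (PySem.Dict.empty, [])).2

-- ===== PORT B =====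
-- Python tuple comparison (size, name) < (size', name')
def bLexLt (p q : Int × String) : Bool :=
  decide (p.1 < q.1) || (p.1 == q.1 && decide (p.2 < q.2))

-- Source B's insert_sorted: skip the elements greater than the new pair, insert before the rest
def bInsert (p : Int × String) : List (Int × String) → List (Int × String)
  | [] => [p]
  | q :: rest => if bLexLt p q then q :: bInsert p rest else p :: q :: rest

-- Source B's streaming scan of `order`: break once the remaining count is exhausted
def bScan (pat : String) (num : Int) : Int → String → List (Int × String) → String
  | _, s, [] => s
  | remaining, s, sn :: rest =>
      if decide (remaining ≤ 0) then s
      else if PySem.Str.isIn pat sn.2 && decide (num < sn.1) then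
        let remaining' := remaining - 1
        let s' := s ++ sn.2 ++ "(" ++ PySem.Int.toStr sn.1 ++ ")"
        bScan pat num remaining' (if 0 < remaining' then s' ++ ", " else s') rest
      else bScan pat num remaining s rest

-- one step of Source B's loop; list.remove is ported as remove?/getD (the removed pair is
-- always present, so Python's ValueError is unreachable)
def bStep (st : PySem.Dict String Int × List (Int × String) × List String) (q : List String) :
    PySem.Dict String Int × List (Int × String) × List String :=
  let sizes := st.1
  let order := st.2.1
  let out := st.2.2
  let cmd := PySem.List.pyGetD q 0 ""
  if cmd = "ADD_FILE" then
    let name := PySem.List.pyGetD q 1 ""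
    let size := (PySem.Int.ofStr? (PySem.List.pyGetD q 2 "")).getD 0
    if sizes.contains name then
      (sizes.insert name size,
       bInsert (size, name) ((PySem.List.remove? order (sizes.getD name 0, name)).getD order),
       out ++ ["overwritten"])
    else
      (sizes.insert name size, bInsert (size, name) order, out ++ ["created"])
  else if cmd = "GET_FILE_SIZE" then
    let name := PySem.List.pyGetD q 1 ""
    (sizes, order, out ++ [if sizes.contains name then PySem.Int.toStr (sizes.getD name 0) else ""])
  else if cmd = "MOVE_FILE" then
    let src := PySem.List.pyGetD q 1 ""
    let dst := PySem.List.pyGetD q 2 ""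
    if !sizes.contains dst && sizes.contains src then
      let sz := sizes.getD src 0
      ((sizes.erase src).insert dst sz,
       bInsert (sz, dst) ((PySem.List.remove? order (sz, src)).getD order),
       out ++ ["true"])
    else (sizes, order, out ++ ["false"])
  else if cmd = "GET_N_LARGEST" then
    let pat := PySem.List.pyGetD q 1 ""
    let num := (PySem.Int.ofStr? (PySem.List.pyGetD q 2 "")).getD 0
    (sizes, order, out ++ [bScan pat num num "" order])
  else st

def solution_alt (queries : List (List String)) : List String :=
  (queries.foldl bStep (PySem.Dict.empty, ([], []))).2.2

-- ===== PRECONDITION & SPEC =====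
-- Pre_ excludes exactly the inputs on which Python A raises: a query that is too short for
-- its command (IndexError) or whose size/count field is not an int literal (ValueError).
def Pre_solution (queries : List (List String)) : Prop :=
  ∀ q ∈ queries, q ≠ [] ∧
    (q.getD 0 "" = "ADD_FILE" → 3 ≤ q.length ∧ (PySem.Int.ofStr? (q.getD 2 "")).isSome) ∧
    (q.getD 0 "" = "GET_FILE_SIZE" → 2 ≤ q.length) ∧
    (q.getD 0 "" = "MOVE_FILE" → 3 ≤ q.length) ∧
    (q.getD 0 "" = "GET_N_LARGEST" → 3 ≤ q.length ∧ (PySem.Int.ofStr? (q.getD 2 "")).isSome)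
instance (queries : List (List String)) : Decidable (Pre_solution queries) := by
  unfold Pre_solution; infer_instance

def pvWitness_solution : List (List String) :=
  [["ADD_FILE", "a.txt", "10"], ["ADD_FILE", "b.txt", "3"], ["GET_FILE_SIZE", "a.txt"],
   ["MOVE_FILE", "a.txt", "c.txt"], ["GET_N_LARGEST", "", "2"]]

def Spec_solution (queries : List (List String)) (out : List String) : Prop := out = solution_alt queries
instance (queries : List (List String)) (out : List String) : Decidable (Spec_solution queries out) := by unfold Spec_solution; infer_instance

-- ===== CLAIM (what is proved, stated in full; the proofs are below) =====
def Claim_equal_solution : Prop := ∀ (queries : List (List String)), Dom_solution queries → Pre_solution queries → Spec_solution queries (solution queries)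

-- ===== LEMMAS AND PROOFS =====

-- the invariant tying A's dict to B's (identical) dict plus sorted index:
-- the index is a permutation of the swapped items, strictly descending in Python's tuple order
def InvFO (files : PySem.Dict String Int) (order : List (Int × String)) : Prop :=
  files.keys.Nodup ∧
  order.Perm (files.items.map (fun p => (p.2, p.1))) ∧
  order.Pairwise (fun a b => toLex b < toLex a)

-- ---- generic list facts about association lists with unique keys ----
lemma filter_ne_eq_erase (l : List (String × Int)) (k : String) (v : Int)
    (hmem : (k, v) ∈ l) (hnd : (l.map Prod.fst).Nodup) :
    l.filter (fun p => !(p.1 == k)) = l.erase (k, v) := by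
  induction l with
  | nil => simp at hmem
  | cons p rest ih =>
    rw [List.map_cons, List.nodup_cons] at hnd
    by_cases hk : p.1 = k
    · have hv : p = (k, v) := by
        rcases List.mem_cons.1 hmem with h | h
        · exact h.symm
        · exact absurd (hk ▸ List.mem_map_of_mem (f := Prod.fst) h) hnd.1
      subst hv
      rw [List.erase_cons_head, List.filter_cons_of_neg (by simp)]
      apply List.filter_eq_self.2
      intro q hq
      have : q.1 ≠ k := fun hq1 =>
        hnd.1 (by simpa [hq1] using List.mem_map_of_mem (f := Prod.fst) hq)
      simp [this]
    · have hpv : p ≠ (k, v) := fun he => hk (by rw [he])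
      have hmem' : (k, v) ∈ rest := by
        rcases List.mem_cons.1 hmem with h | h
        · exact absurd h.symm hpv
        · exact h
      rw [List.filter_cons_of_pos (by simp [hk]), List.erase_cons_tail (by simp [hpv]),
        ih hmem' hnd.2]

lemma map_replace_perm (l : List (String × Int)) (k : String) (v w : Int)
    (hmem : (k, v) ∈ l) (hnd : (l.map Prod.fst).Nodup) :
    (l.map (fun p => if p.1 == k then (k, w) else p)).Perm ((k, w) :: l.erase (k, v)) := by
  induction l with
  | nil => simp at hmem
  | cons p rest ih =>
    rw [List.map_cons, List.nodup_cons] at hnd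
    by_cases hk : p.1 = k
    · have hv : p = (k, v) := by
        rcases List.mem_cons.1 hmem with h | h
        · exact h.symm
        · exact absurd (hk ▸ List.mem_map_of_mem (f := Prod.fst) h) hnd.1
      subst hv
      rw [List.map_cons, List.erase_cons_head, if_pos (by simp)]
      apply List.Perm.cons
      have hfix : ∀ q ∈ rest, (if q.1 == k then ((k, w) : String × Int) else q) = id q := by
        intro q hq
        have : q.1 ≠ k := fun hq1 =>
          hnd.1 (by simpa [hq1] using List.mem_map_of_mem (f := Prod.fst) hq)
        simp [this]
      rw [List.map_congr_left hfix, List.map_id]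
    · have hpv : p ≠ (k, v) := fun he => hk (by rw [he])
      have hmem' : (k, v) ∈ rest := by
        rcases List.mem_cons.1 hmem with h | h
        · exact absurd h.symm hpv
        · exact h
      rw [List.map_cons, List.erase_cons_tail (by simp [hpv]), if_neg (by simp [hk])]
      exact ((ih hmem' hnd.2).cons p).trans (List.Perm.swap (k, w) p (rest.erase (k, v)))

-- ---- bInsert facts ----
lemma bLexLt_iff (p q : Int × String) : bLexLt p q = true ↔ toLex p < toLex q := by
  simp [bLexLt, Prod.Lex.toLex_lt_toLex]

lemma bInsert_perm (p : Int × String) (l : List (Int × String)) :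
    (bInsert p l).Perm (p :: l) := by
  induction l with
  | nil => simp [bInsert]
  | cons q rest ih =>
    rw [bInsert]
    by_cases hb : bLexLt p q = true
    · rw [if_pos hb]
      exact (ih.cons q).trans (List.Perm.swap p q rest)
    · rw [if_neg hb]

lemma bInsert_pairwise (p : Int × String) (l : List (Int × String))
    (hl : l.Pairwise (fun a b => toLex b < toLex a))
    (hne : ∀ q ∈ l, q.2 ≠ p.2) :
    (bInsert p l).Pairwise (fun a b => toLex b < toLex a) := by
  induction l with
  | nil => simp [bInsert]
  | cons q rest ih =>
    rcases List.pairwise_cons.1 hl with ⟨hq, hrest⟩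
    rw [bInsert]
    by_cases hb : bLexLt p q = true
    · rw [if_pos hb]
      refine List.pairwise_cons.2 ⟨?_, ih hrest (fun r hr => hne r (List.mem_cons_of_mem _ hr))⟩
      intro r hr
      have hmem : r = p ∨ r ∈ rest := by
        have := (bInsert_perm p rest).mem_iff.1 hr
        simpa using this
      rcases hmem with rfl | hr'
      · exact (bLexLt_iff _ _).1 hb
      · exact hq r hr'
    · rw [if_neg hb]
      have hne' : toLex q ≠ toLex p := by
        intro he
        have : q = p := by simpa using he
        exact hne q (List.mem_cons_self ..) (by rw [this])
      have hlt : toLex q < toLex p := by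
        rcases lt_trichotomy (toLex p) (toLex q) with h1 | h1 | h1
        · exact absurd ((bLexLt_iff p q).2 h1) hb
        · exact absurd h1.symm hne'
        · exact h1
      refine List.pairwise_cons.2 ⟨?_, List.pairwise_cons.2 ⟨hq, hrest⟩⟩
      intro r hr
      rcases List.mem_cons.1 hr with rfl | hr'
      · exact hlt
      · exact lt_trans (hq r hr') hlt

-- ---- A's sort, named: it is the descending lex rearrangement, i.e. B's index swapped ----
lemma sorted2_eq_sorted_toLex (xs : List (String × Int)) :
    PySem.List.sorted2 xs (fun p => p.2) (fun p => p.1) true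
      = PySem.List.sorted xs (fun p => toLex (p.2, p.1)) true := by
  simp only [PySem.List.sorted2, PySem.List.sorted]
  congr 1
  funext acc x
  congr 1
  funext a b
  rcases lt_trichotomy a.2 b.2 with h | h | h
  · simp only [Prod.Lex.toLex_lt_toLex]
    simp [h, lt_asymm h]
    intro he
    exact absurd he (ne_of_gt h)
  · simp only [Prod.Lex.toLex_lt_toLex]
    simp [h]
  · simp only [Prod.Lex.toLex_lt_toLex]
    simp [h, lt_asymm h, ne_of_lt h]

lemma temp_eq (files : PySem.Dict String Int) (order : List (Int × String))
    (h : InvFO files order) :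
    PySem.List.sorted2 files.items (fun item => item.2) (fun item => item.1) true
      = order.map (fun q => (q.2, q.1)) := by
  obtain ⟨hnd, hperm, hpair⟩ := h
  rw [sorted2_eq_sorted_toLex]
  apply PySem.List.sorted_rev_eq_of_perm_of_pairwise_gt
  · have := hperm.map (fun q : Int × String => (q.2, q.1))
    simpa [List.map_map, Function.comp_def] using this
  · rw [List.pairwise_map]
    simpa using hpair

-- ---- the GET_N_LARGEST string: A's guarded fold equals B's early-exit scan ----
-- A's count/string accumulator, written over (size, name) pairs
def aPure (pat : String) (num : Int) (cs : Int × String) (q : Int × String) : Int × String :=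
  if PySem.Str.isIn pat q.2 && decide (num < q.1) && decide (0 < cs.1) then
    let count := cs.1 - 1
    let string := cs.2 ++ q.2 ++ "(" ++ PySem.Int.toStr q.1 ++ ")"
    (count, if 0 < count then string ++ ", " else string)
  else cs

lemma foldl_aPure_nonpos (pat : String) (num : Int) (l : List (Int × String))
    (c : Int) (s : String) (hc : ¬ 0 < c) :
    l.foldl (aPure pat num) (c, s) = (c, s) := by
  induction l with
  | nil => rfl
  | cons q rest ih =>
    rw [List.foldl_cons]
    have hstep : aPure pat num (c, s) q = (c, s) := by
      unfold aPure
      rw [if_neg (by simp [hc])]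
    rw [hstep, ih]

lemma bScan_eq_foldl (pat : String) (num : Int) :
    ∀ (l : List (Int × String)) (c : Int) (s : String),
      bScan pat num c s l = (l.foldl (aPure pat num) (c, s)).2 := by
  intro l
  induction l with
  | nil => intro c s; rfl
  | cons q rest ih =>
    intro c s
    rw [bScan, List.foldl_cons]
    by_cases hc : 0 < c
    · rw [if_neg (by simpa using hc)]
      by_cases hm : (PySem.Str.isIn pat q.2 && decide (num < q.1)) = true
      · have hstep : aPure pat num (c, s) q
            = (c - 1, if 0 < c - 1 then s ++ q.2 ++ "(" ++ PySem.Int.toStr q.1 ++ ")" ++ ", "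
                      else s ++ q.2 ++ "(" ++ PySem.Int.toStr q.1 ++ ")") := by
          unfold aPure
          rw [if_pos (by simp only [Bool.and_eq_true, decide_eq_true_eq] at hm ⊢; exact ⟨hm, hc⟩)]
        rw [if_pos hm, hstep, ih]
      · have hstep : aPure pat num (c, s) q = (c, s) := by
          unfold aPure
          rw [if_neg (by simp only [Bool.and_eq_true] at hm ⊢; tauto)]
        rw [if_neg hm, hstep, ih]
    · rw [if_pos (by simpa using hc)]
      have hstep : aPure pat num (c, s) q = (c, s) := by
        unfold aPure
        rw [if_neg (by simp [hc])]
      rw [hstep, foldl_aPure_nonpos pat num rest c s hc]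

lemma nlargest_eq (files : PySem.Dict String Int) (order : List (Int × String))
    (pat : String) (num : Int) (h : InvFO files order) :
    ((PySem.List.sorted2 files.items (fun item => item.2) (fun item => item.1) true).foldl
      (fun (cs : Int × String) kv =>
        if PySem.Str.isIn pat kv.1 && decide (num < files.getD kv.1 0) && decide (0 < cs.1) then
          let count := cs.1 - 1
          let string := cs.2 ++ kv.1 ++ "(" ++ PySem.Int.toStr (files.getD kv.1 0) ++ ")"
          (count, if 0 < count then string ++ ", " else string)
        else cs) (num, "")).2 = bScan pat num num "" order := by
  rw [temp_eq files order h, List.foldl_map]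
  have hcongr : ∀ (cs : Int × String) (q : Int × String), q ∈ order →
      (if PySem.Str.isIn pat (q.2, q.1).1 && decide (num < files.getD (q.2, q.1).1 0)
          && decide (0 < cs.1) then
        let count := cs.1 - 1
        let string := cs.2 ++ (q.2, q.1).1 ++ "(" ++ PySem.Int.toStr (files.getD (q.2, q.1).1 0) ++ ")"
        (count, if 0 < count then string ++ ", " else string)
      else cs) = aPure pat num cs q := by
    intro cs q hq
    obtain ⟨hnd, hperm, hpair⟩ := h
    have hmem : (q.2, q.1) ∈ files.items := by
      have := hperm.mem_iff.1 hq
      rcases List.mem_map.1 this with ⟨p, hp, hpq⟩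
      subst hpq
      simpa using hp
    have hget : files.getD q.2 0 = q.1 :=
      PySem.Dict.getD_of_mem_items files hmem hnd 0
    simp [aPure, hget]
  rw [PySem.List.foldl_congr_mem order
    (fun (cs : Int × String) (q : Int × String) =>
      if PySem.Str.isIn pat (q.2, q.1).1 && decide (num < files.getD (q.2, q.1).1 0)
          && decide (0 < cs.1) then
        let count := cs.1 - 1
        let string := cs.2 ++ (q.2, q.1).1 ++ "(" ++ PySem.Int.toStr (files.getD (q.2, q.1).1 0) ++ ")"
        (count, if 0 < count then string ++ ", " else string)
      else cs)
    (aPure pat num) (num, "") hcongr, ← bScan_eq_foldl]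

-- ---- invariant maintenance ----
lemma mem_items_get (d : PySem.Dict String Int) (k : String) (hc : d.contains k = true) :
    (k, d.getD k 0) ∈ d.items := by
  have hsome : (d.get? k).isSome := by
    rw [← PySem.Dict.contains_eq_isSome_get?]
    exact hc
  obtain ⟨v, hv⟩ := Option.isSome_iff_exists.1 hsome
  have hgd : d.getD k 0 = v := PySem.Dict.getD_of_get?_eq_some d 0 hv
  rw [hgd]
  exact PySem.Dict.mem_items_of_get?_eq_some d hv

lemma not_key_of_not_contains (d : PySem.Dict String Int) (x : String)
    (hc : d.contains x = false) : ∀ p ∈ d.items, p.1 ≠ x := by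
  intro p hp
  simp only [PySem.Dict.contains, List.any_eq_false] at hc
  simpa using hc p hp

lemma erase_names_ne (l : List (String × Int)) (k : String) (v : Int)
    (hmem : (k, v) ∈ l) (hnd : (l.map Prod.fst).Nodup) :
    ∀ p ∈ l.erase (k, v), p.1 ≠ k := by
  intro p hp
  rw [← filter_ne_eq_erase l k v hmem hnd] at hp
  have := List.of_mem_filter hp
  simpa using this

lemma nodup_keys_erase (d : PySem.Dict String Int) (k : String) (h : d.keys.Nodup) :
    (d.erase k).keys.Nodup := by
  simp only [PySem.Dict.keys, PySem.Dict.erase] at *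
  exact (List.filter_sublist.map _).nodup h

lemma contains_erase_false (d : PySem.Dict String Int) (src dst : String)
    (hd : d.contains dst = false) : (d.erase src).contains dst = false := by
  simp only [PySem.Dict.contains, PySem.Dict.erase, List.any_eq_false] at hd ⊢
  intro p hp
  exact hd p (List.mem_of_mem_filter hp)

lemma inv_empty : InvFO PySem.Dict.empty [] := by
  refine ⟨by simp [PySem.Dict.keys, PySem.Dict.empty], ?_, List.Pairwise.nil⟩
  simp [PySem.Dict.empty]

lemma inv_add (files : PySem.Dict String Int) (order : List (Int × String))
    (h : InvFO files order) (f : String) (s : Int) :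
    InvFO (files.insert f s)
      (if files.contains f then
        bInsert (s, f) ((PySem.List.remove? order (files.getD f 0, f)).getD order)
       else bInsert (s, f) order) := by
  obtain ⟨hnd, hperm, hpair⟩ := h
  have hndf : (files.items.map Prod.fst).Nodup := hnd
  by_cases hc : files.contains f = true
  · rw [if_pos hc]
    have hmemI : (f, files.getD f 0) ∈ files.items := mem_items_get files f hc
    have hmemO : (files.getD f 0, f) ∈ order :=
      hperm.mem_iff.2 (List.mem_map_of_mem (f := fun p : String × Int => (p.2, p.1)) hmemI)
    have hrem : (PySem.List.remove? order (files.getD f 0, f)).getD order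
        = order.erase (files.getD f 0, f) := by
      rw [PySem.List.remove?_eq_some_erase order (files.getD f 0, f) hmemO]
      rfl
    rw [hrem]
    have hswpinj : Function.Injective (fun p : String × Int => (p.2, p.1)) := by
      intro a b hab
      simp only [Prod.mk.injEq] at hab
      exact Prod.ext hab.2 hab.1
    have herase_eq : (order.erase (files.getD f 0, f)).Perm
        ((files.items.erase (f, files.getD f 0)).map (fun p : String × Int => (p.2, p.1))) := by
      have h1 := hperm.erase (files.getD f 0, f)
      rw [List.map_erase hswpinj]
      exact h1
    refine ⟨PySem.Dict.nodup_keys_insert files f s hnd, ?_, ?_⟩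
    · rw [PySem.Dict.items_insert_of_contains files s hc]
      refine (bInsert_perm _ _).trans ((herase_eq.cons (s, f)).trans ?_)
      exact ((map_replace_perm files.items f (files.getD f 0) s hmemI hndf).map
        (fun p : String × Int => (p.2, p.1))).symm
    · apply bInsert_pairwise
      · exact List.Pairwise.erase _ hpair
      · intro qq hq
        have hq' := herase_eq.mem_iff.1 hq
        rcases List.mem_map.1 hq' with ⟨p, hp, hpq⟩
        have hne := erase_names_ne files.items f (files.getD f 0) hmemI hndf p hp
        rw [← hpq]
        simpa using hne
  · rw [if_neg hc]
    have hc' : files.contains f = false := by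
      cases hcc : files.contains f
      · rfl
      · exact absurd hcc hc
    refine ⟨PySem.Dict.nodup_keys_insert files f s hnd, ?_, ?_⟩
    · rw [PySem.Dict.items_insert_of_not_contains files s hc']
      rw [List.map_append]
      refine (bInsert_perm _ _).trans ((hperm.cons (s, f)).trans ?_)
      exact (List.perm_append_singleton _ _).symm
    · apply bInsert_pairwise
      · exact hpair
      · intro qq hq
        have hq' := hperm.mem_iff.1 hq
        rcases List.mem_map.1 hq' with ⟨p, hp, hpq⟩
        have hne := not_key_of_not_contains files f hc' p hp
        rw [← hpq]
        simpa using hne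

lemma move_dict_eq (files : PySem.Dict String Int) (src dst : String) (sz : Int)
    (hd : files.contains dst = false) (hs : files.contains src = true) :
    (files.insert dst sz).erase src = (files.erase src).insert dst sz := by
  have hsd : dst ≠ src := by
    intro he
    rw [he, hs] at hd
    cases hd
  apply PySem.Dict.ext
  rw [PySem.Dict.items_insert_of_not_contains _ _ (contains_erase_false files src dst hd)]
  simp only [PySem.Dict.erase]
  rw [PySem.Dict.items_insert_of_not_contains _ _ hd, List.filter_append]
  simp [hsd]

lemma inv_move (files : PySem.Dict String Int) (order : List (Int × String))
    (h : InvFO files order) (src dst : String)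
    (hd : files.contains dst = false) (hs : files.contains src = true) :
    InvFO ((files.erase src).insert dst (files.getD src 0))
      (bInsert (files.getD src 0, dst)
        ((PySem.List.remove? order (files.getD src 0, src)).getD order)) := by
  obtain ⟨hnd, hperm, hpair⟩ := h
  have hndf : (files.items.map Prod.fst).Nodup := hnd
  have hmemI : (src, files.getD src 0) ∈ files.items := mem_items_get files src hs
  have hmemO : (files.getD src 0, src) ∈ order :=
    hperm.mem_iff.2 (List.mem_map_of_mem (f := fun p : String × Int => (p.2, p.1)) hmemI)
  have hrem : (PySem.List.remove? order (files.getD src 0, src)).getD order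
      = order.erase (files.getD src 0, src) := by
    rw [PySem.List.remove?_eq_some_erase order (files.getD src 0, src) hmemO]
    rfl
  rw [hrem]
  have hswpinj : Function.Injective (fun p : String × Int => (p.2, p.1)) := by
    intro a b hab
    simp only [Prod.mk.injEq] at hab
    exact Prod.ext hab.2 hab.1
  have herase_eq : (order.erase (files.getD src 0, src)).Perm
      ((files.items.erase (src, files.getD src 0)).map (fun p : String × Int => (p.2, p.1))) := by
    have h1 := hperm.erase (files.getD src 0, src)
    rw [List.map_erase hswpinj]
    exact h1
  refine ⟨PySem.Dict.nodup_keys_insert _ dst (files.getD src 0) (nodup_keys_erase files src hnd),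
    ?_, ?_⟩
  · rw [PySem.Dict.items_insert_of_not_contains _ _ (contains_erase_false files src dst hd)]
    simp only [PySem.Dict.erase]
    rw [filter_ne_eq_erase files.items src (files.getD src 0) hmemI hndf, List.map_append]
    refine (bInsert_perm _ _).trans ((herase_eq.cons (files.getD src 0, dst)).trans ?_)
    exact (List.perm_append_singleton _ _).symm
  · apply bInsert_pairwise
    · exact List.Pairwise.erase _ hpair
    · intro qq hq
      have hqo : qq ∈ order := (List.erase_sublist).mem hq
      have hq' := hperm.mem_iff.1 hqo
      rcases List.mem_map.1 hq' with ⟨p, hp, hpq⟩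
      have hne := not_key_of_not_contains files dst hd p hp
      rw [← hpq]
      simpa using hne

-- ---- the step and loop equivalences ----
lemma step_eq (files : PySem.Dict String Int) (order : List (Int × String))
    (ret : List String) (q : List String) (h : InvFO files order) :
    aStep (files, ret) q
        = ((bStep (files, order, ret) q).1, (bStep (files, order, ret) q).2.2)
      ∧ InvFO (bStep (files, order, ret) q).1 (bStep (files, order, ret) q).2.1 := by
  by_cases h1 : PySem.List.pyGetD q 0 "" = "ADD_FILE"
  · have h2 : ¬ PySem.List.pyGetD q 0 "" = "GET_FILE_SIZE" := by rw [h1]; decide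
    have h3 : ¬ PySem.List.pyGetD q 0 "" = "MOVE_FILE" := by rw [h1]; decide
    have h4 : ¬ PySem.List.pyGetD q 0 "" = "GET_N_LARGEST" := by rw [h1]; decide
    unfold aStep bStep
    dsimp only
    rw [if_pos h1, if_neg h2, if_neg h3, if_neg h4, if_pos h1]
    by_cases hc : files.contains (PySem.List.pyGetD q 1 "") = true
    · rw [if_pos hc, if_pos hc]
      refine ⟨rfl, ?_⟩
      have hia := inv_add files order h (PySem.List.pyGetD q 1 "")
        ((PySem.Int.ofStr? (PySem.List.pyGetD q 2 "")).getD 0)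
      rw [if_pos hc] at hia
      exact hia
    · rw [if_neg hc, if_neg hc]
      refine ⟨rfl, ?_⟩
      have hia := inv_add files order h (PySem.List.pyGetD q 1 "")
        ((PySem.Int.ofStr? (PySem.List.pyGetD q 2 "")).getD 0)
      rw [if_neg hc] at hia
      exact hia
  · by_cases h2 : PySem.List.pyGetD q 0 "" = "GET_FILE_SIZE"
    · have h3 : ¬ PySem.List.pyGetD q 0 "" = "MOVE_FILE" := by rw [h2]; decide
      have h4 : ¬ PySem.List.pyGetD q 0 "" = "GET_N_LARGEST" := by rw [h2]; decide
      unfold aStep bStep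
      dsimp only
      rw [if_neg h1, if_pos h2, if_neg h3, if_neg h4, if_neg h1, if_pos h2]
      by_cases hc : files.contains (PySem.List.pyGetD q 1 "") = true
      · rw [if_pos hc, if_pos hc]
        exact ⟨rfl, h⟩
      · rw [if_neg hc, if_neg hc]
        exact ⟨rfl, h⟩
    · by_cases h3 : PySem.List.pyGetD q 0 "" = "MOVE_FILE"
      · have h4 : ¬ PySem.List.pyGetD q 0 "" = "GET_N_LARGEST" := by rw [h3]; decide
        unfold aStep bStep
        dsimp only
        rw [if_neg h1, if_neg h2, if_pos h3, if_neg h4, if_neg h1, if_neg h2, if_pos h3]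
        by_cases hmv : (!files.contains (PySem.List.pyGetD q 2 "")
            && files.contains (PySem.List.pyGetD q 1 "")) = true
        · rw [if_pos hmv, if_pos hmv]
          have hmv' := hmv
          simp only [Bool.and_eq_true, Bool.not_eq_eq_eq_not, Bool.not_true] at hmv'
          have hd : files.contains (PySem.List.pyGetD q 2 "") = false := hmv'.1
          have hs : files.contains (PySem.List.pyGetD q 1 "") = true := hmv'.2
          refine ⟨?_, ?_⟩
          · rw [move_dict_eq files (PySem.List.pyGetD q 1 "") (PySem.List.pyGetD q 2 "")
              (files.getD (PySem.List.pyGetD q 1 "") 0) hd hs]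
          · exact inv_move files order h (PySem.List.pyGetD q 1 "") (PySem.List.pyGetD q 2 "") hd hs
        · rw [if_neg hmv, if_neg hmv]
          exact ⟨rfl, h⟩
      · by_cases h4 : PySem.List.pyGetD q 0 "" = "GET_N_LARGEST"
        · unfold aStep bStep
          dsimp only
          rw [if_neg h1, if_neg h2, if_neg h3, if_pos h4, if_neg h1, if_neg h2, if_neg h3,
            if_pos h4]
          refine ⟨?_, h⟩
          rw [nlargest_eq files order (PySem.List.pyGetD q 1 "")
            ((PySem.Int.ofStr? (PySem.List.pyGetD q 2 "")).getD 0) h]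
        · unfold aStep bStep
          dsimp only
          rw [if_neg h1, if_neg h2, if_neg h3, if_neg h4, if_neg h1, if_neg h2, if_neg h3,
            if_neg h4]
          exact ⟨rfl, h⟩

lemma loop_eq (qs : List (List String)) :
    ∀ (files : PySem.Dict String Int) (order : List (Int × String)) (ret : List String),
      InvFO files order →
      qs.foldl aStep (files, ret)
        = ((qs.foldl bStep (files, order, ret)).1, (qs.foldl bStep (files, order, ret)).2.2) := by
  induction qs with
  | nil => intro files order ret h; rfl
  | cons q qs ih =>
    intro files order ret h
    rw [List.foldl_cons, List.foldl_cons]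
    obtain ⟨heq, hinv⟩ := step_eq files order ret q h
    rw [heq]
    exact ih (bStep (files, order, ret) q).1 (bStep (files, order, ret) q).2.1
      (bStep (files, order, ret) q).2.2 hinv

-- ===== VERDICT (by name: the statement is the Claim_ definition above) =====
theorem solution_spec : Claim_equal_solution := by
  intro queries _ _
  unfold Spec_solution solution solution_alt
  rw [loop_eq queries PySem.Dict.empty [] [] inv_empty]
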